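-- pv_equiv track=rewrite | github.com/stuchain/CuePoint | query_generator.py | _title_prefixes
-- ===== SOURCE A (Python) =====
-- from typing import List, Optional, Tuple
--
-- def _ordered_unique(seq: List[str]) -> List[str]:
--     """Remove duplicates while preserving order"""
--     seen = set()
--     out = []
--     for s in seq:
--         k = s.lower().strip()
--         if k and k not in seen:
--             seen.add(k)
--             out.append(s.strip())
--     return out
--
-- def _title_prefixes(tokens: List[str], k_min: int = 2, k_max: Optional[int] = None) -> List[str]:
--     """Generate left-anchored prefixes from tokens"""
--     n = len(tokens)
--     if n == 0:
--         return []
--     if k_max is None or k_max > n: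
--         k_max = n
--     out = []
--     for k in range(max(1, k_min), k_max + 1):
--         if k <= n:
--             s = " ".join(tokens[:k]).strip()
--             if s:
--                 out.append(s)
--     return _ordered_unique(out)
-- ===== SOURCE B (Python) =====
-- from typing import List, Optional
--
-- def _title_prefixes(tokens: List[str], k_min: int = 2, k_max: Optional[int] = None) -> List[str]:
--     """Generate left-anchored prefixes from tokens (one join, then extend the running
--     prefix one token per step, deduplicating as it emits)."""
--     n = len(tokens)
--     if n == 0:
--         return []
--     hi = n if (k_max is None or k_max > n) else k_max
--     lo = max(1, k_min)
--     stop = hi if hi > 0 else 0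
--     joined = " ".join(tokens[:lo - 1])
--     seen = set()
--     out = []
--     for i, t in enumerate(tokens[lo - 1:stop]):
--         joined = t if lo + i == 1 else joined + " " + t
--         s = joined.strip()
--         if s:
--             key = s.lower()
--             if key not in seen:
--                 seen.add(key)
--                 out.append(s)
--     return out
-- ===== Notes on version B (the rewrite author's own statement) =====
-- stated objective: alternative
-- what changed: A re-joins tokens[:k] from scratch for every k and then removes duplicates in a separate _ordered_unique pass; B joins the first k_min-1 tokens once, then makes one pass over the emitting range, extending the running joined prefix by one token per step and deduplicating (by lowercase key) as it emits, so the second pass disappears.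
import Mathlib
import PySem

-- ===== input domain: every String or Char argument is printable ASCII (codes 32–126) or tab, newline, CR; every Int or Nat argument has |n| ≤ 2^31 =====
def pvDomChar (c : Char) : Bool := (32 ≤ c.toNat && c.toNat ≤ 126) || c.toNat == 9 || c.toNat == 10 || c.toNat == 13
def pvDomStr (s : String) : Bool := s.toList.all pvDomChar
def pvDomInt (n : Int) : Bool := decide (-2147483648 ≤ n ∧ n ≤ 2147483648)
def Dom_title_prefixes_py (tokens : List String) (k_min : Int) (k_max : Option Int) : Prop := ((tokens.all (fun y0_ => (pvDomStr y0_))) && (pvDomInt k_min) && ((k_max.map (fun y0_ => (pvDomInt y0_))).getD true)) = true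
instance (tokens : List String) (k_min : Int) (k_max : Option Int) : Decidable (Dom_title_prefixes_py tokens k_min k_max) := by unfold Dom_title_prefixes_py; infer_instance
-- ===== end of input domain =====

-- B replaces A's per-k re-join of the prefix plus a separate dedup pass by one base join and
-- ONE pass over the emitting range that extends the running joined prefix and dedups as it emits.

-- ===== PORT A =====
-- helper: _ordered_unique from the same module
def pv_ordered_unique (seq : List String) : List String :=
  (seq.foldl
    (fun (st : PySem.Set String × List String) s =>
      let k := PySem.Str.strip (PySem.Str.lower s)
      if k ≠ "" ∧ k ∉ st.1 then (PySem.Set.add st.1 k, st.2 ++ [PySem.Str.strip s])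
      else st)
    (PySem.Set.empty, [])).2

def title_prefixes_py (tokens : List String) (k_min : Int) (k_max : Option Int) : List String :=
  let n : Int := (tokens.length : Int)
  if n = 0 then []
  else
    let kmax : Int := match k_max with
      | none => n
      | some k => if n < k then n else k
    let out : List String :=
      (PySem.List.pyRange (max 1 k_min) (kmax + 1) 1).foldl
        (fun out k =>
          if k ≤ n then
            let s := PySem.Str.strip (PySem.Str.join " " (PySem.List.slice tokens none (some k)))
            if s ≠ "" then out ++ [s] else out
          else out) []
    pv_ordered_unique out

-- ===== PORT B =====
-- the body of Source B's single for-loop (state: running joined prefix, seen lowercase keys, output)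
def pvBStep (lo : Int) (st : String × PySem.Set String × List String) (p : Int × String) :
    String × PySem.Set String × List String :=
  let joined := if lo + p.1 == 1 then p.2 else st.1 ++ " " ++ p.2
  let s := PySem.Str.strip joined
  if s ≠ "" ∧ PySem.Str.lower s ∉ st.2.1 then
    (joined, PySem.Set.add st.2.1 (PySem.Str.lower s), st.2.2 ++ [s])
  else (joined, st.2)

def title_prefixes_py_alt (tokens : List String) (k_min : Int) (k_max : Option Int) : List String :=
  let n : Int := (tokens.length : Int)
  if n = 0 then []
  else
    let hi : Int := match k_max with
      | none => n
      | some k => if n < k then n else k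
    let lo : Int := max 1 k_min
    let stop : Int := if 0 < hi then hi else 0
    let joined0 : String := PySem.Str.join " " (PySem.List.slice tokens none (some (lo - 1)))
    ((PySem.List.enumerate (PySem.List.slice tokens (some (lo - 1)) (some stop)) 0).foldl
      (pvBStep lo) (joined0, PySem.Set.empty, [])).2.2

-- ===== PRECONDITION & SPEC =====
def Spec_title_prefixes_py (tokens : List String) (k_min : Int) (k_max : Option Int) (out : List String) : Prop := out = title_prefixes_py_alt tokens k_min k_max
instance (tokens : List String) (k_min : Int) (k_max : Option Int) (out : List String) : Decidable (Spec_title_prefixes_py tokens k_min k_max out) := by unfold Spec_title_prefixes_py; infer_instance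

-- ===== CLAIM (what is proved, stated in full; the proofs are below) =====
def Claim_equal_title_prefixes_py : Prop := ∀ (tokens : List String) (k_min : Int) (k_max : Option Int), Dom_title_prefixes_py tokens k_min k_max → Spec_title_prefixes_py tokens k_min k_max (title_prefixes_py tokens k_min k_max)

-- ===== LEMMAS AND PROOFS =====

-- character-level facts
theorem pv_isupper_iff (c : Char) : PySem.Chars.isupper c = true ↔ (65 ≤ c.toNat ∧ c.toNat ≤ 90) := by
  simp [PySem.Chars.isupper, Char.le_def]
  exact Iff.rfl

theorem pv_isspace_lowerChar (c : Char) : PySem.Chars.isspace (PySem.Chars.lowerChar c) = PySem.Chars.isspace c := by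
  unfold PySem.Chars.lowerChar
  split_ifs with h
  · have hb : 65 ≤ c.toNat ∧ c.toNat ≤ 90 := (pv_isupper_iff c).mp h
    have hv : (c.toNat + 32).isValidChar := Or.inl (by omega)
    have ht : (Char.ofNat (c.toNat + 32)).toNat = c.toNat + 32 := by
      rw [Char.toNat_ofNat, if_pos hv]
    have h1 : PySem.Chars.isspace (Char.ofNat (c.toNat + 32)) = false := by
      simp [PySem.Chars.isspace, ht]; omega
    have h2 : PySem.Chars.isspace c = false := by
      simp [PySem.Chars.isspace]; omega
    rw [h1, h2]
  · rfl

theorem pv_lower_strip_comm (s : List Char) :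
    PySem.Chars.strip (PySem.Chars.lower s) = PySem.Chars.lower (PySem.Chars.strip s) := by
  have hps : (PySem.Chars.isspace ∘ PySem.Chars.lowerChar) = PySem.Chars.isspace :=
    funext pv_isspace_lowerChar
  simp [PySem.Chars.strip, PySem.Chars.lstrip, PySem.Chars.rstrip, PySem.Chars.lower,
    ← List.map_reverse, List.dropWhile_map, hps]

theorem pv_strip_idem_chars (s : List Char) :
    PySem.Chars.strip (PySem.Chars.strip s) = PySem.Chars.strip s := by
  have hr : PySem.Chars.rstrip = List.rdropWhile PySem.Chars.isspace := rfl
  unfold PySem.Chars.strip PySem.Chars.lstrip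
  rw [hr]
  set p := PySem.Chars.isspace
  set u := List.dropWhile p s with hu_def
  have hu : List.dropWhile p u = u := List.dropWhile_idempotent p s
  have hd : List.dropWhile p (List.rdropWhile p u) = List.rdropWhile p u := by
    rw [List.dropWhile_eq_self_iff]
    intro hl
    have hpre := List.rdropWhile_prefix p u
    have h0 : (List.rdropWhile p u)[0] = u[0]'(by
        have := hpre.length_le
        have h1 : 0 < u.length := lt_of_lt_of_le hl this
        exact h1) := by
      exact List.IsPrefix.getElem hpre hl
    rw [h0]
    exact List.dropWhile_eq_self_iff.mp hu _
  rw [hd, List.rdropWhile_idempotent]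

-- string-level corollaries
theorem pv_str_strip_strip (j : String) :
    PySem.Str.strip (PySem.Str.strip j) = PySem.Str.strip j := by
  apply String.toList_inj.mp
  simp [PySem.Str.strip, pv_strip_idem_chars]

theorem pv_str_strip_lower (s : String) (hs : PySem.Str.strip s = s) :
    PySem.Str.strip (PySem.Str.lower s) = PySem.Str.lower s := by
  apply String.toList_inj.mp
  have hts : PySem.Chars.strip s.toList = s.toList := by
    have := congrArg String.toList hs
    simpa [PySem.Str.strip] using this
  simp [PySem.Str.strip, PySem.Str.lower, pv_lower_strip_comm, hts]

theorem pv_str_lower_eq_empty (s : String) : PySem.Str.lower s = "" ↔ s = "" := by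
  constructor
  · intro h
    have := congrArg String.toList h
    simp [PySem.Str.lower, PySem.Chars.lower] at this
    exact String.toList_inj.mp (by simp [this])
  · intro h; subst h; rfl

-- the shared per-emission step (dedup fused into the producing pass)
def pvStep (st : PySem.Set String × List String) (s : String) : PySem.Set String × List String :=
  if s ≠ "" ∧ PySem.Str.lower s ∉ st.1 then (PySem.Set.add st.1 (PySem.Str.lower s), st.2 ++ [s]) else st

-- the candidate string for prefix length k
def pvF (tokens : List String) (k : Int) : String :=
  PySem.Str.strip (PySem.Str.join " " (PySem.List.slice tokens none (some k)))

-- A's trailing dedup pass, on a list of already-stripped strings, is a fold of pvStep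
theorem pv_ou_eq_fold (M : List String) (hst : ∀ s ∈ M, PySem.Str.strip s = s) :
    pv_ordered_unique M = (M.foldl pvStep (PySem.Set.empty, [])).2 := by
  unfold pv_ordered_unique
  rw [PySem.List.foldl_congr_mem M _ pvStep (PySem.Set.empty, [])]
  intro st s hs
  simp only [pvStep, pv_str_strip_lower s (hst s hs), hst s hs]
  by_cases he : s = ""
  · subst he
    simp [pv_str_lower_eq_empty]
  · have hl : PySem.Str.lower s ≠ "" := fun hme => he ((pv_str_lower_eq_empty s).mp hme)
    simp [he, hl]

-- folding pvStep ignores empty strings, so the "if s" filter can be dropped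
theorem pv_fold_filter_map (l : List Int) (f : Int → String)
    (init : PySem.Set String × List String) :
    ((l.filter (fun k => decide (f k ≠ ""))).map f).foldl pvStep init = (l.map f).foldl pvStep init := by
  induction l generalizing init with
  | nil => rfl
  | cons k t ih =>
    by_cases hk : f k = ""
    · have h1 : (decide (f k ≠ "")) = false := by simp [hk]
      simp only [List.filter_cons, h1, Bool.false_eq_true, if_false, List.map_cons, List.foldl_cons]
      have h2 : pvStep init (f k) = init := by simp [pvStep, hk]
      rw [h2]
      exact ih init
    · have h1 : (decide (f k ≠ "")) = true := by simp [hk]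
      simp only [List.filter_cons, h1, if_true, List.map_cons, List.foldl_cons]
      exact ih _

-- join extension
theorem pv_ic_cons_cons (sep a b : List Char) (u : List (List Char)) :
    sep.intercalate (a :: b :: u) = a ++ sep ++ sep.intercalate (b :: u) := by
  simp [List.intercalate, List.intersperse]

theorem pv_join_append_chars (sep : List Char) (l : List (List Char)) (x : List Char) (h : l ≠ []) :
    PySem.Chars.join sep (l ++ [x]) = PySem.Chars.join sep l ++ sep ++ x := by
  induction l with
  | nil => exact absurd rfl h
  | cons a t ih =>
    cases t with
    | nil => simp [PySem.Chars.join, List.intercalate, List.intersperse]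
    | cons b u =>
      have hih := ih (by simp)
      simp only [PySem.Chars.join] at hih ⊢
      have e1 : (a :: b :: u) ++ [x] = a :: (b :: (u ++ [x])) := by simp
      rw [e1, pv_ic_cons_cons]
      have e2 : (b :: u) ++ [x] = b :: (u ++ [x]) := by simp
      rw [e2] at hih
      rw [hih, pv_ic_cons_cons]
      simp [List.append_assoc]

theorem pv_join_append (l : List String) (x : String) (h : l ≠ []) :
    PySem.Str.join " " (l ++ [x]) = PySem.Str.join " " l ++ " " ++ x := by
  apply String.toList_inj.mp
  have hl : l.map String.toList ≠ [] := by simpa using h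
  simp [PySem.Str.join, pv_join_append_chars _ _ _ hl]

theorem pv_join_singleton (x : String) : PySem.Str.join " " [x] = x := by
  apply String.toList_inj.mp
  simp [PySem.Str.join, PySem.Chars.join_singleton]

-- slicing with nonnegative bounds
theorem pv_clamp_nonneg {α : Type} (xs : List α) (a : Int) (ha : 0 ≤ a) :
    PySem.List.clampIdx xs.length a = min a.toNat xs.length := by
  unfold PySem.List.clampIdx
  rw [if_neg (by omega)]

theorem pv_slice_empty {α : Type} (xs : List α) (a b : Int) (ha : 0 ≤ a) (hb : 0 ≤ b) (hba : b ≤ a) :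
    PySem.List.slice xs (some a) (some b) = [] := by
  simp only [PySem.List.slice, pv_clamp_nonneg xs a ha, pv_clamp_nonneg xs b hb]
  have h0 : min b.toNat xs.length - min a.toNat xs.length = 0 := by omega
  rw [h0]
  rfl

theorem pv_slice_ab {α : Type} (xs : List α) (a b : Int) (ha : 0 ≤ a) (hb : 0 ≤ b) (hab : a ≤ b)
    (hbn : b.toNat ≤ xs.length) :
    PySem.List.slice xs (some a) (some b) = (xs.drop a.toNat).take (b.toNat - a.toNat) := by
  simp only [PySem.List.slice, pv_clamp_nonneg xs a ha, pv_clamp_nonneg xs b hb]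
  have h1 : min a.toNat xs.length = a.toNat := by omega
  have h2 : min b.toNat xs.length = b.toNat := by omega
  rw [h1, h2]

-- B's loop body, restated as "new joined prefix, plus pvStep on the rest of the state"
theorem pv_bstep_eq (lo : Int) (st : String × PySem.Set String × List String) (p : Int × String) :
    pvBStep lo st p = ((if lo + p.1 == 1 then p.2 else st.1 ++ " " ++ p.2),
      pvStep st.2 (PySem.Str.strip (if lo + p.1 == 1 then p.2 else st.1 ++ " " ++ p.2))) := by
  unfold pvBStep pvStep
  by_cases h2 : PySem.Str.strip (if (lo + p.1 == 1) then p.2 else st.1 ++ " " ++ p.2) ≠ "" ∧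
      PySem.Str.lower (PySem.Str.strip (if (lo + p.1 == 1) then p.2 else st.1 ++ " " ++ p.2)) ∉ st.2.1
  · simp only [if_pos h2]
  · simp only [if_neg h2]

-- THE LOOP INVARIANT: starting from the joined (lo-1)-prefix, B's pass over the next m
-- tokens yields the joined ((lo-1)+m)-prefix and the fused fold over k = lo..(lo-1)+m
theorem pv_b_inv (tokens : List String) (lo : Int) (hlo : 1 ≤ lo) (m : Nat)
    (hm : (lo - 1).toNat + m ≤ tokens.length) :
    (PySem.List.enumerate ((tokens.drop (lo - 1).toNat).take m) 0).foldl (pvBStep lo)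
        (PySem.Str.join " " (tokens.take (lo - 1).toNat), PySem.Set.empty, []) =
      (PySem.Str.join " " (tokens.take ((lo - 1).toNat + m)),
       (PySem.List.pyRange lo (lo + (m : Int)) 1).foldl
         (fun st k => pvStep st (pvF tokens k)) (PySem.Set.empty, [])) := by
  induction m with
  | zero =>
    simp [PySem.List.pyRange_one_eq_nil (le_refl lo)]
  | succ m ih =>
    have hm' : (lo - 1).toNat + m ≤ tokens.length := by omega
    have hidx : (lo - 1).toNat + m < tokens.length := by omega
    have hmd : m < (tokens.drop (lo - 1).toNat).length := by
      simp [List.length_drop]; omega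
    have htake : (tokens.drop (lo - 1).toNat).take (m + 1)
        = (tokens.drop (lo - 1).toNat).take m ++ [tokens[(lo - 1).toNat + m]] := by
      rw [List.take_succ_eq_append_getElem hmd]
      congr 1
      simp [List.getElem_drop]
    have hlen : ((tokens.drop (lo - 1).toNat).take m).length = m := by
      simp [List.length_take, List.length_drop]; omega
    rw [htake, PySem.List.enumerate_append, List.foldl_append, ih hm', hlen]
    have henum : PySem.List.enumerate [tokens[(lo - 1).toNat + m]] ((0:Int) + (m:Nat))
        = [((m:Int), tokens[(lo - 1).toNat + m])] := by
      simp [PySem.List.enumerate]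
    rw [henum]
    simp only [List.foldl_cons, List.foldl_nil]
    rw [pv_bstep_eq]
    have htake2 : tokens.take ((lo - 1).toNat + m + 1)
        = tokens.take ((lo - 1).toNat + m) ++ [tokens[(lo - 1).toNat + m]] :=
      List.take_succ_eq_append_getElem hidx
    have hJ : (if (lo + (m:Int) == 1) then tokens[(lo - 1).toNat + m]
          else PySem.Str.join " " (tokens.take ((lo - 1).toNat + m)) ++ " " ++ tokens[(lo - 1).toNat + m])
        = PySem.Str.join " " (tokens.take ((lo - 1).toNat + m + 1)) := by
      by_cases hz : lo = 1 ∧ m = 0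
      · obtain ⟨hz1, hz2⟩ := hz
        subst hz1; subst hz2
        have hb : ((1:Int) + ((0:Nat):Int) == 1) = true := by decide
        rw [hb]
        simp only [if_true]
        rw [htake2]
        have h0 : List.take (((1:Int) - 1).toNat + 0) tokens = [] := by
          have he : ((1:Int) - 1).toNat + 0 = 0 := by omega
          rw [he, List.take_zero]
        rw [h0, List.nil_append, pv_join_singleton]
      · have hb : ((lo + (m:Int)) == 1) = false := by
          simp only [beq_eq_false_iff_ne, ne_eq]
          intro hc
          exact hz ⟨by omega, by omega⟩
        rw [hb]
        simp only [Bool.false_eq_true, if_false]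
        rw [htake2, pv_join_append _ _ (by
          simp only [ne_eq, ← List.length_pos_iff, List.length_take]
          omega)]
    have hF : PySem.Str.strip (PySem.Str.join " " (tokens.take ((lo - 1).toNat + m + 1)))
        = pvF tokens (lo + (m:Int)) := by
      unfold pvF
      rw [PySem.List.slice_to tokens (by omega : (0:Int) ≤ lo + (m:Int))]
      have h2 : (lo + (m:Int)).toNat = (lo - 1).toNat + m + 1 := by omega
      rw [h2]
    have hcast : lo + ((m+1:Nat):Int) = (lo + (m:Int)) + 1 := by push_cast; ring
    rw [hcast, PySem.List.pyRange_one_succ_right (by omega : lo ≤ lo + (m:Int)), List.foldl_append]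
    simp only [List.foldl_cons, List.foldl_nil, hJ, hF]
    rfl

-- the core equality, for any lower bound lo ≥ 1 and clamped upper bound hi ≤ len(tokens)
theorem pv_main (tokens : List String) (lo hi : Int) (hlo1 : (1:Int) ≤ lo)
    (hhin : hi ≤ (tokens.length : Int)) :
    pv_ordered_unique
      ((PySem.List.pyRange lo (hi + 1) 1).foldl
        (fun out k =>
          if k ≤ (tokens.length : Int) then
            if PySem.Str.strip (PySem.Str.join " " (PySem.List.slice tokens none (some k))) ≠ "" then
              out ++ [PySem.Str.strip (PySem.Str.join " " (PySem.List.slice tokens none (some k)))]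
            else out
          else out) [])
    = ((PySem.List.enumerate
          (PySem.List.slice tokens (some (lo - 1)) (some (if 0 < hi then hi else 0))) 0).foldl
        (pvBStep lo)
        (PySem.Str.join " " (PySem.List.slice tokens none (some (lo - 1))), PySem.Set.empty, [])).2.2 := by
  set n : Int := (tokens.length : Int) with hn
  set stop : Int := if 0 < hi then hi else 0 with hstop
  have hstop0 : 0 ≤ stop := by
    rw [hstop]; split_ifs <;> omega
  have hstopn : stop ≤ n := by
    rw [hstop]; split_ifs <;> omega
  have hlo0 : (0:Int) ≤ lo - 1 := by omega
  -- A side: the producing loop is a filter-map over the range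
  have hbody : (PySem.List.pyRange lo (hi + 1) 1).foldl
      (fun out k =>
        if k ≤ n then
          if PySem.Str.strip (PySem.Str.join " " (PySem.List.slice tokens none (some k))) ≠ "" then
            out ++ [PySem.Str.strip (PySem.Str.join " " (PySem.List.slice tokens none (some k)))]
          else out
        else out) []
      = (PySem.List.pyRange lo (hi + 1) 1).foldl
          (fun out k => if pvF tokens k ≠ "" then out ++ [pvF tokens k] else out) [] := by
    apply PySem.List.foldl_congr_mem
    intro acc k hk
    have hmem := (PySem.List.mem_pyRange_one).mp hk
    have hkn : k ≤ n := by omega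
    simp only [if_pos hkn]
    rfl
  rw [hbody]
  rw [PySem.List.foldl_append_ite (p := fun k => pvF tokens k ≠ "") (f := pvF tokens)]
  rw [List.nil_append]
  rw [pv_ou_eq_fold]
  · rw [pv_fold_filter_map, List.foldl_map]
    -- B side
    rw [PySem.List.slice_to tokens hlo0]
    by_cases hcase : hi < lo
    · -- empty emitting range on both sides
      have hsl : PySem.List.slice tokens (some (lo - 1)) (some stop) = [] :=
        pv_slice_empty tokens _ _ hlo0 hstop0 (by omega)
      have hra : PySem.List.pyRange lo (hi + 1) 1 = [] :=
        PySem.List.pyRange_one_eq_nil (by omega)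
      rw [hsl, hra]
      rfl
    · -- lo ≤ hi = stop
      have hlohi : lo ≤ hi := by omega
      have hs : stop = hi := by rw [hstop, if_pos (by omega)]
      rw [hs]
      have hsl : PySem.List.slice tokens (some (lo - 1)) (some hi)
          = (tokens.drop (lo - 1).toNat).take (hi.toNat - (lo - 1).toNat) :=
        pv_slice_ab tokens _ _ hlo0 (by omega) (by omega) (by omega)
      rw [hsl]
      have hm : (lo - 1).toNat + (hi.toNat - (lo - 1).toNat) ≤ tokens.length := by omega
      rw [pv_b_inv tokens lo hlo1 (hi.toNat - (lo - 1).toNat) hm]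
      have hend : lo + ((hi.toNat - (lo - 1).toNat : Nat) : Int) = hi + 1 := by
        omega
      rw [hend]
  · intro s hs
    rcases List.mem_map.mp hs with ⟨k, _, rfl⟩
    exact pv_str_strip_strip _

-- ===== VERDICT (by name: the statement is the Claim_ definition above) =====
theorem title_prefixes_py_spec : Claim_equal_title_prefixes_py := by
  unfold Claim_equal_title_prefixes_py
  intro tokens k_min k_max _
  unfold Spec_title_prefixes_py title_prefixes_py title_prefixes_py_alt
  by_cases hnil : (tokens.length : Int) = 0
  · simp [hnil]
  · simp only [if_neg hnil]
    refine pv_main tokens (max 1 k_min) _ (le_max_left _ _) ?_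
    cases k_max with
    | none => simp
    | some k =>
      simp only []
      split_ifs <;> omega
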